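-- pv_equiv track=rewrite | github.com/code-philia/CodeSearch | GraphCodeBERT/codesearch/auto_labelling_format_index.py | convert_to_intervals
-- ===== SOURCE A (Python) =====
-- def convert_to_intervals(indices):
--     """将索引列表转换为区间格式"""
--     if not indices:
--         return []
--
--     intervals = []
--     start = indices[0]
--     end = indices[0]
--
--     for i in range(1, len(indices)):
--         if indices[i] == end + 1:
--             end = indices[i]
--         else:
--             intervals.append(start)
--             intervals.append(end)
--             start = indices[i]
--             end = indices[i]
--
--     intervals.append(start)
--     intervals.append(end)
--     return intervals
-- ===== SOURCE B (Python) =====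
-- def convert_to_intervals(indices):
--     """将索引列表转换为区间格式"""
--     if not indices:
--         return []
--     gap = [b != a + 1 for a, b in zip(indices, indices[1:])]
--     starts = [indices[0]] + [x for x, brk in zip(indices[1:], gap) if brk]
--     ends = [x for x, brk in zip(indices, gap) if brk] + [indices[-1]]
--     return [v for pair in zip(starts, ends) for v in pair]
-- ===== Notes on version B (the rewrite author's own statement) =====
-- stated objective: alternative
-- what changed: Replaces A's stateful single-pass start/end accumulator loop with staged data-parallel passes: a boolean break-mask built by zipping the list with its own shift, two comprehensions selecting run starts and run ends from that mask, and a final zip interleaving them.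
import Mathlib
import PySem

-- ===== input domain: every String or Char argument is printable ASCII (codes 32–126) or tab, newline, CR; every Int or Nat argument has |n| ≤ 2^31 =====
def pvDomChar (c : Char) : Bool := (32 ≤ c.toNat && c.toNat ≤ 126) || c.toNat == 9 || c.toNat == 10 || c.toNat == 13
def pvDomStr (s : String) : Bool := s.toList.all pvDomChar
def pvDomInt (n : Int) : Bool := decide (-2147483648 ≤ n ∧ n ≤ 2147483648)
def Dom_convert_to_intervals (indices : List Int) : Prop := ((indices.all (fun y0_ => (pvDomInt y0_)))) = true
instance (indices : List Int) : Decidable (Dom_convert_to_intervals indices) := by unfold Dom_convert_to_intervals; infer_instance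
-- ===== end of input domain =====

-- B replaces A's stateful start/end accumulator loop by staged passes (a break-mask
-- from zipping the list with its shift, comprehensions selecting run starts/ends,
-- interleaved by zip); alternative decomposition, same cost, equal return value proved.


-- ===== PORT A =====
-- loop of A: state (start, end, intervals), branches in source order
def aLoop (start e : Int) (acc : List Int) : List Int → List Int
  | [] => acc ++ [start, e]
  | x :: xs =>
    if x = e + 1 then aLoop start x acc xs
    else aLoop x x (acc ++ [start, e]) xs

def convert_to_intervals (indices : List Int) : List Int :=
  match indices with
  | [] => []
  | x :: _ => aLoop x x [] (indices.drop 1)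

-- ===== PORT B =====
-- gap = [b != a + 1 for a, b in zip(indices, indices[1:])]
def bGap (indices : List Int) : List Bool :=
  List.zipWith (fun a b => decide (b ≠ a + 1)) indices (indices.drop 1)

def convert_to_intervals_alt (indices : List Int) : List Int :=
  match indices with
  | [] => []
  | x :: xs =>
    let gap := bGap (x :: xs)
    -- starts = [indices[0]] + [x for x, brk in zip(indices[1:], gap) if brk]
    let starts := x :: ((xs.zip gap).filter (fun p => p.2)).map (fun p => p.1)
    -- ends = [x for x, brk in zip(indices, gap) if brk] + [indices[-1]]
    -- (indices is nonempty here, so indices[-1] is its last element)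
    let ends := ((((x :: xs).zip gap).filter (fun p => p.2)).map (fun p => p.1))
                  ++ [(x :: xs).getLast (List.cons_ne_nil x xs)]
    -- return [v for pair in zip(starts, ends) for v in pair]
    (starts.zip ends).flatMap (fun p => [p.1, p.2])

-- ===== PRECONDITION & SPEC =====
def Spec_convert_to_intervals (indices : List Int) (out : List Int) : Prop := out = convert_to_intervals_alt indices
instance (indices : List Int) (out : List Int) : Decidable (Spec_convert_to_intervals indices out) := by unfold Spec_convert_to_intervals; infer_instance

-- ===== CLAIM (what is proved, stated in full; the proofs are below) =====
def Claim_equal_convert_to_intervals : Prop := ∀ (indices : List Int), Dom_convert_to_intervals indices → Spec_convert_to_intervals indices (convert_to_intervals indices)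

-- ===== LEMMAS AND PROOFS =====

-- proof-side canonical form: recursive run splitting
def runEnd (e : Int) : List Int → Int × List Int
  | [] => (e, [])
  | x :: xs => if x = e + 1 then runEnd x xs else (e, x :: xs)

theorem runEnd_snd_len (e : Int) (xs : List Int) : (runEnd e xs).2.length ≤ xs.length := by
  induction xs generalizing e with
  | nil => simp [runEnd]
  | cons x xs ih =>
    simp only [runEnd]
    split
    · exact le_trans (ih x) (Nat.le_succ _)
    · simp

def runSplit (indices : List Int) : List Int :=
  match indices with
  | [] => []
  | x :: xs =>
    let p := runEnd x xs
    x :: p.1 :: runSplit p.2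
termination_by indices.length
decreasing_by
  exact Nat.lt_succ_of_le (runEnd_snd_len x xs)

theorem aLoop_eq (xs : List Int) : ∀ (start e : Int) (acc : List Int),
    aLoop start e acc xs = acc ++ start :: (runEnd e xs).1 :: runSplit (runEnd e xs).2 := by
  induction xs with
  | nil => intro s e acc; rw [runSplit.eq_def]; simp [aLoop, runEnd]
  | cons x xs ih =>
    intro s e acc
    simp only [aLoop, runEnd]
    split
    · exact ih s x acc
    · rw [ih x x, runSplit]
      simp

-- the two staged passes of B, as functions of head and tail
def Bs (x : Int) (xs : List Int) : List Int :=
  ((xs.zip (bGap (x :: xs))).filter (fun p => p.2)).map (fun p => p.1)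

def Be (x : Int) (xs : List Int) : List Int :=
  (((x :: xs).zip (bGap (x :: xs))).filter (fun p => p.2)).map (fun p => p.1)

theorem alt_cons (x : Int) (xs : List Int) :
    convert_to_intervals_alt (x :: xs) =
      ((x :: Bs x xs).zip (Be x xs ++ [(x :: xs).getLast (List.cons_ne_nil x xs)])).flatMap
        (fun p => [p.1, p.2]) := rfl

theorem bGap_cons (x y : Int) (ys : List Int) :
    bGap (x :: y :: ys) = decide (y ≠ x + 1) :: bGap (y :: ys) := by
  simp [bGap]

theorem Bs_cons (x y : Int) (ys : List Int) :
    Bs x (y :: ys) = (if y = x + 1 then [] else [y]) ++ Bs y ys := by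
  simp only [Bs, bGap_cons, List.zip_cons_cons, List.filter_cons]
  by_cases h : y = x + 1 <;> simp [h]

theorem Be_cons (x y : Int) (ys : List Int) :
    Be x (y :: ys) = (if y = x + 1 then [] else [x]) ++ Be y ys := by
  simp only [Be, bGap_cons, List.zip_cons_cons, List.filter_cons]
  by_cases h : y = x + 1 <;> simp [h]

theorem alt_eq_runSplit (xs : List Int) : ∀ (x : Int),
    convert_to_intervals_alt (x :: xs) = runSplit (x :: xs) := by
  induction xs with
  | nil =>
    intro x
    rw [alt_cons, runSplit]
    simp [Bs, Be, bGap, runEnd, runSplit]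
  | cons y ys ih =>
    intro x
    rw [alt_cons, runSplit]
    simp only [runEnd]
    have hlast : (x :: y :: ys).getLast (List.cons_ne_nil x (y :: ys)) =
        (y :: ys).getLast (List.cons_ne_nil y ys) := by
      simp [List.getLast]
    rw [Bs_cons, Be_cons, hlast]
    by_cases h : y = x + 1
    · simp only [if_pos h, List.nil_append]
      have ihy := ih y
      rw [alt_cons, runSplit] at ihy
      -- destructure the (nonempty) ends list to peel one interleave step
      cases hE : Be y ys ++ [(y :: ys).getLast (List.cons_ne_nil y ys)] with
      | nil => exact absurd hE (by simp)
      | cons e E' =>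
        rw [hE] at ihy
        simp only [List.zip_cons_cons, List.flatMap_cons, List.cons_append,
          List.nil_append, List.cons.injEq] at ihy ⊢
        obtain ⟨-, h1, h2⟩ := ihy
        exact ⟨trivial, h1, h2⟩
    · simp only [if_neg h, List.cons_append, List.zip_cons_cons, List.flatMap_cons,
        List.nil_append]
      have ihy := ih y
      rw [alt_cons] at ihy
      rw [ihy]

-- ===== VERDICT (by name: the statement is the Claim_ definition above) =====
theorem convert_to_intervals_spec : Claim_equal_convert_to_intervals := by
  intro indices _
  unfold Spec_convert_to_intervals
  cases indices with
  | nil => rfl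
  | cons x xs =>
    show aLoop x x [] ((x :: xs).drop 1) = _
    rw [List.drop_one, List.tail_cons, aLoop_eq, List.nil_append, alt_eq_runSplit,
      runSplit]
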